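-- pv_equiv track=rewrite | github.com/faradawn/tutorials | algo/icpc/companies/duolingo-maze/duolingo-oa-most-mistakes.py | find_mistakes
-- ===== SOURCE A (Python) =====
-- from typing import List
--
-- def find_mistakes(submissions: List[List[str]]) -> List[str]:
--     """Find all mistakes from the input submissions list. A correct word
--     is a word that occurs most often in each spot across all submissions. If
--     two words are occur equally often in the top spot, both are considered
--     'correct'. A mistake is any word that is not a correct word. The returned
--     list of mistakes should be sorted by most occurrences to least occurrences
--     with ties broken alphabetically.
--     """
--     tempRes = {}
--     for j in range(len(submissions[0])):
--         dic = {}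
--         for i in range(len(submissions)):
--             dic[submissions[i][j]] = dic.get(submissions[i][j], 0) + 1
--         arr = sorted(dic.items(), key=lambda x: -x[1])
--
--         k = 0
--         first_freq = -1
--
--         for tup in arr:
--             if k == 0:
--                 first_freq = tup[1]
--             else:
--                 if tup[1] < first_freq:
--                     tempRes[tup[0]] = tempRes.get(tup[0], 0) + tup[1]
--             k += 1
--
--     res = []
--     for name, _ in sorted(tempRes.items(), key=lambda x: (-x[1], x[0])):
--         res.append(name)
--     return res
-- ===== SOURCE B (Python) =====
-- from typing import List
--
-- def find_mistakes(submissions: List[List[str]]) -> List[str]: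
--     totals = {}
--     for j in range(len(submissions[0])):
--         # sort the column, then run-length-encode it: equal words form one run
--         col = sorted(row[j] for row in submissions)
--         runs = []
--         i = 0
--         while i < len(col):
--             k = i
--             while k < len(col) and col[k] == col[i]:
--                 k += 1
--             runs.append((col[i], k - i))
--             i = k
--         m = max(c for _, c in runs)
--         for w, c in runs:
--             if c < m:
--                 totals[w] = totals.get(w, 0) + c
--     return [w for w, _ in sorted(totals.items(), key=lambda x: (-x[1], x[0]))]
-- ===== Notes on version B (the rewrite author's own statement) =====
-- stated objective: alternative
-- what changed: B counts each column by sorting it and run-length-encoding the sorted list (equal words form contiguous runs), then adds every run shorter than the longest run to the totals, instead of A's incremental dict counting followed by sorting the (word,count) items by descending count and a skip-the-first-element scan; no per-column dictionary or count-sort is built at all.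
import Mathlib
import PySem

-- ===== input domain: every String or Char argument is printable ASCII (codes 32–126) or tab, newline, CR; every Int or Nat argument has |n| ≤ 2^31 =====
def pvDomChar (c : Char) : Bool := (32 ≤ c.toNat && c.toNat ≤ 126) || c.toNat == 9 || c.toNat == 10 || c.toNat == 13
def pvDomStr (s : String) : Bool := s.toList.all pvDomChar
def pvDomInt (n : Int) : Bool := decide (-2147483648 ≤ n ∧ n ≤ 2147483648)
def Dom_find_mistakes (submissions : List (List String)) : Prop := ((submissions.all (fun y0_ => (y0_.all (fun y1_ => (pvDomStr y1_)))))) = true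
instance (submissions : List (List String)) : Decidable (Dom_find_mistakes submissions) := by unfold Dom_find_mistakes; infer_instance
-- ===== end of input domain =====

-- B counts each column by sorting it and run-length-encoding the runs of equal words, adding runs
-- shorter than the longest run, instead of A's dict counting + a sort of the counts + a
-- skip-the-first scan (objective: alternative). Equivalence is about return values; neither
-- program mutates its argument.

-- ===== PORT A =====
def find_mistakes (submissions : List (List String)) : List String :=
  let tempRes : PySem.Dict String Int :=
    (PySem.List.pyRange 0 (PySem.List.len (PySem.List.pyGetD submissions 0 []))).foldl
      (fun tempRes j =>
        let dic : PySem.Dict String Int :=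
          (PySem.List.pyRange 0 (PySem.List.len submissions)).foldl
            (fun dic i =>
              dic.insert (PySem.List.pyGetD (PySem.List.pyGetD submissions i []) j "")
                (dic.getD (PySem.List.pyGetD (PySem.List.pyGetD submissions i []) j "") 0 + 1))
            PySem.Dict.empty
        let arr := PySem.List.sorted dic.items (fun x => -x.2)
        let st :=
          arr.foldl
            (fun (st : Int × Int × PySem.Dict String Int) tup =>
              if st.1 == 0 then (st.1 + 1, tup.2, st.2.2)
              else if tup.2 < st.2.1 then
                (st.1 + 1, st.2.1, st.2.2.insert tup.1 (st.2.2.getD tup.1 0 + tup.2))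
              else (st.1 + 1, st.2.1, st.2.2))
            (0, -1, tempRes)
        st.2.2)
      PySem.Dict.empty
  (PySem.List.sorted2 tempRes.items (fun x => -x.2) (fun x => x.1)).foldl
    (fun res p => res ++ [p.1]) []

-- ===== PORT B =====
-- Source B's inner while-loop scanning one run of equal words at a time, as the obvious structural
-- recursion: each step emits the leading run (its word and length) and continues past it (exact)
def runsOf (l : List String) : List (String × Int) :=
  match l with
  | [] => []
  | w :: t =>
      (w, 1 + ((t.takeWhile (fun x => x == w)).length : Int)) ::
        runsOf (t.dropWhile (fun x => x == w))
termination_by l.length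
decreasing_by
  have := List.length_dropWhile_le (fun x => x == w) t
  simp only [List.length_cons]
  omega

def find_mistakes_alt (submissions : List (List String)) : List String :=
  let totals : PySem.Dict String Int :=
    (PySem.List.pyRange 0 (PySem.List.len (PySem.List.pyGetD submissions 0 []))).foldl
      (fun totals j =>
        let col := PySem.List.sorted (submissions.map (fun row => PySem.List.pyGetD row j ""))
          (fun w => w)
        let runs := runsOf col
        -- max(c for _, c in runs): runs is nonempty whenever the loop body runs, so the default is never used
        let m := PySem.List.maxD (runs.map (fun p => p.2)) (fun v => v) 0
        runs.foldl (fun t p => if p.2 < m then t.insert p.1 (t.getD p.1 0 + p.2) else t) totals)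
      PySem.Dict.empty
  (PySem.List.sorted2 totals.items (fun x => -x.2) (fun x => x.1)).map (fun p => p.1)

-- ===== PRECONDITION & SPEC =====
-- Pre_ excludes exactly the inputs where A raises IndexError: the empty list (submissions[0])
-- and ragged inputs where some row is shorter than row 0 (submissions[i][j]).
def Pre_find_mistakes (submissions : List (List String)) : Prop :=
  submissions ≠ [] ∧ ∀ row ∈ submissions, (submissions.headD []).length ≤ row.length
instance (submissions : List (List String)) : Decidable (Pre_find_mistakes submissions) := by
  unfold Pre_find_mistakes; infer_instance

def pvWitness_find_mistakes : List (List String) := [["a", "x"], ["b", "x"], ["b", "y"]]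

def Spec_find_mistakes (submissions : List (List String)) (out : List String) : Prop :=
  out = find_mistakes_alt submissions
instance (submissions : List (List String)) (out : List String) : Decidable (Spec_find_mistakes submissions out) := by
  unfold Spec_find_mistakes; infer_instance

-- ===== CLAIM (what is proved, stated in full; the proofs are below) =====
def Claim_equal_find_mistakes : Prop := ∀ (submissions : List (List String)), Dom_find_mistakes submissions → Pre_find_mistakes submissions → Spec_find_mistakes submissions (find_mistakes submissions)

-- ===== LEMMAS AND PROOFS =====

-- the j-th column of the grid
def colAt (submissions : List (List String)) (j : Nat) : List String :=
  submissions.map (fun r => r.getD j "")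

-- add p.2 to the tally of p.1 for every pair with second component < ff
def condAdd (ff : Int) (t : PySem.Dict String Int) (L : List (String × Int)) : PySem.Dict String Int :=
  L.foldl (fun t p => if p.2 < ff then t.insert p.1 (t.getD p.1 0 + p.2) else t) t

def astep (submissions : List (List String)) (tempRes : PySem.Dict String Int) (j : Nat) :
    PySem.Dict String Int :=
  ((PySem.List.sorted (PySem.Dict.counter (colAt submissions j)).items (fun x => -x.2)).foldl
    (fun (st : Int × Int × PySem.Dict String Int) tup =>
      if st.1 == 0 then (st.1 + 1, tup.2, st.2.2)
      else if tup.2 < st.2.1 then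
        (st.1 + 1, st.2.1, st.2.2.insert tup.1 (st.2.2.getD tup.1 0 + tup.2))
      else (st.1 + 1, st.2.1, st.2.2))
    (0, -1, tempRes)).2.2

def bstep (submissions : List (List String)) (t : PySem.Dict String Int) (j : Nat) :
    PySem.Dict String Int :=
  condAdd
    (PySem.List.maxD ((runsOf (PySem.List.sorted (colAt submissions j) (fun w => w))).map
      (fun p => p.2)) (fun v => v) 0)
    t (runsOf (PySem.List.sorted (colAt submissions j) (fun w => w)))

-- the relation maintained between A's tempRes and B's totals
def rel (t₁ t₂ : PySem.Dict String Int) : Prop :=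
  t₁.keys.Nodup ∧ t₂.keys.Nodup ∧ (∀ w, w ∈ t₁.keys ↔ w ∈ t₂.keys) ∧ ∀ w, t₁.getD w 0 = t₂.getD w 0

lemma aloop_unroll (tl : List (String × Int)) :
    ∀ (k ff : Int) (t : PySem.Dict String Int), 0 < k →
    (tl.foldl
      (fun (st : Int × Int × PySem.Dict String Int) tup =>
        if st.1 == 0 then (st.1 + 1, tup.2, st.2.2)
        else if tup.2 < st.2.1 then
          (st.1 + 1, st.2.1, st.2.2.insert tup.1 (st.2.2.getD tup.1 0 + tup.2))
        else (st.1 + 1, st.2.1, st.2.2))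
      (k, ff, t)) = (k + tl.length, ff, condAdd ff t tl) := by
  induction tl with
  | nil => intro k ff t hk; simp [condAdd]
  | cons p tl ih =>
    intro k ff t hk
    have hk0 : (k == 0) = false := by simp; omega
    simp only [List.foldl_cons, hk0, Bool.false_eq_true, if_false]
    by_cases hp : p.2 < ff
    · rw [if_pos hp, ih (k + 1) ff _ (by omega)]
      have h1 : k + 1 + (tl.length : Int) = k + ((p :: tl).length : Int) := by push_cast [List.length_cons]; omega
      have h3 : condAdd ff (t.insert p.1 (t.getD p.1 0 + p.2)) tl = condAdd ff t (p :: tl) := by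
        simp [condAdd, hp]
      rw [h1, h3]
    · rw [if_neg hp, ih (k + 1) ff _ (by omega)]
      have h1 : k + 1 + (tl.length : Int) = k + ((p :: tl).length : Int) := by push_cast [List.length_cons]; omega
      have h3 : condAdd ff t tl = condAdd ff t (p :: tl) := by
        simp [condAdd, hp]
      rw [h1, h3]

lemma aloop_run (hd : String × Int) (tl : List (String × Int)) (t : PySem.Dict String Int) :
    (((hd :: tl).foldl
      (fun (st : Int × Int × PySem.Dict String Int) tup =>
        if st.1 == 0 then (st.1 + 1, tup.2, st.2.2)
        else if tup.2 < st.2.1 then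
          (st.1 + 1, st.2.1, st.2.2.insert tup.1 (st.2.2.getD tup.1 0 + tup.2))
        else (st.1 + 1, st.2.1, st.2.2))
      (0, -1, t))).2.2 = condAdd hd.2 t tl := by
  show (tl.foldl
      (fun (st : Int × Int × PySem.Dict String Int) tup =>
        if st.1 == 0 then (st.1 + 1, tup.2, st.2.2)
        else if tup.2 < st.2.1 then
          (st.1 + 1, st.2.1, st.2.2.insert tup.1 (st.2.2.getD tup.1 0 + tup.2))
        else (st.1 + 1, st.2.1, st.2.2))
      ((1 : Int), hd.2, t)).2.2 = condAdd hd.2 t tl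
  rw [aloop_unroll tl 1 hd.2 t one_pos]

lemma insertAdd_getD (L : List (String × Int)) (t : PySem.Dict String Int) (w : String) :
    (L.foldl (fun t p => t.insert p.1 (t.getD p.1 0 + p.2)) t).getD w 0
      = t.getD w 0 + ((L.filter (fun p => p.1 == w)).map (·.2)).sum := by
  induction L generalizing t with
  | nil => simp
  | cons p L ih =>
    rw [List.foldl_cons, ih]
    by_cases hw : p.1 = w
    · simp [hw]
      ring
    · simp [hw, PySem.Dict.getD_insert, Ne.symm hw]

lemma condAdd_eq_filter_fold (ff : Int) (t : PySem.Dict String Int) (L : List (String × Int)) :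
    condAdd ff t L
      = (L.filter (fun p => decide (p.2 < ff))).foldl
          (fun t p => t.insert p.1 (t.getD p.1 0 + p.2)) t := by
  unfold condAdd
  induction L generalizing t with
  | nil => rfl
  | cons p L ih =>
    rw [List.foldl_cons, List.filter_cons]
    by_cases hp : p.2 < ff
    · simp only [hp, decide_true, if_pos, List.foldl_cons]
      exact ih _
    · simp only [hp, decide_false, Bool.false_eq_true, if_false]
      exact ih _

lemma condAdd_getD (ff : Int) (t : PySem.Dict String Int) (L : List (String × Int)) (w : String) :
    (condAdd ff t L).getD w 0
      = t.getD w 0 + (((L.filter (fun p => decide (p.2 < ff))).filter (fun p => p.1 == w)).map (·.2)).sum := by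
  rw [condAdd_eq_filter_fold, insertAdd_getD]

lemma condAdd_keys (ff : Int) (t : PySem.Dict String Int) (L : List (String × Int)) :
    (condAdd ff t L).keys
      = PySem.Set.update t.keys ((L.filter (fun p => decide (p.2 < ff))).map (·.1)) := by
  rw [condAdd_eq_filter_fold]
  exact PySem.Dict.keys_foldl_insert_key _ (fun p : String × Int => p.1)
    (fun t p => t.getD p.1 0 + p.2) t

lemma condAdd_nodup (ff : Int) (t : PySem.Dict String Int) (L : List (String × Int))
    (h : t.keys.Nodup) : (condAdd ff t L).keys.Nodup := by
  rw [condAdd_eq_filter_fold]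
  exact PySem.Dict.nodup_keys_foldl_insert_key _ (fun p : String × Int => p.1) _ t h

lemma condAdd_rel {t₁ t₂ : PySem.Dict String Int} (ff : Int)
    {L₁ L₂ : List (String × Int)} (hperm : L₁.Perm L₂) (h : rel t₁ t₂) :
    rel (condAdd ff t₁ L₁) (condAdd ff t₂ L₂) := by
  obtain ⟨hn₁, hn₂, hmem, hval⟩ := h
  have hpf := hperm.filter (fun p : String × Int => decide (p.2 < ff))
  refine ⟨condAdd_nodup ff t₁ L₁ hn₁, condAdd_nodup ff t₂ L₂ hn₂, ?_, ?_⟩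
  · intro w
    rw [condAdd_keys, condAdd_keys, PySem.Set.mem_update, PySem.Set.mem_update,
      hmem w, (hpf.map (·.1)).mem_iff]
  · intro w
    rw [condAdd_getD, condAdd_getD, hval w,
      ((hpf.filter (fun p : String × Int => p.1 == w)).map (·.2)).sum_eq]

-- ===== run-length encoding of a sorted list: keys are distinct, values are the counts =====
lemma runsOf_spec : ∀ (l : List String), l.Pairwise (· ≤ ·) →
    ((runsOf l).map Prod.fst).Nodup ∧
    (∀ w, w ∈ (runsOf l).map Prod.fst ↔ w ∈ l) ∧
    (∀ p ∈ runsOf l, p.2 = (l.count p.1 : Int)) := by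
  intro l
  induction l using runsOf.induct with
  | case1 => intro _; simp [runsOf]
  | case2 w t ih =>
    intro hs
    have hsplit : t.takeWhile (fun x => x == w) ++ t.dropWhile (fun x => x == w) = t :=
      List.takeWhile_append_dropWhile
    have hsub : (t.dropWhile (fun x => x == w)).Sublist t := List.dropWhile_sublist _
    have hst : (t.dropWhile (fun x => x == w)).Pairwise (· ≤ ·) :=
      (List.pairwise_cons.mp hs).2.sublist hsub
    have hwle : ∀ x ∈ t, w ≤ x := (List.pairwise_cons.mp hs).1
    -- w does not occur past its leading run
    have hwnot : w ∉ t.dropWhile (fun x => x == w) := by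
      intro hw
      cases hdw : t.dropWhile (fun x => x == w) with
      | nil => rw [hdw] at hw; simp at hw
      | cons x r =>
        have hxw : (x == w) = false := by
          have := List.head?_dropWhile_not (fun x => x == w) t
          rw [hdw] at this; simpa using this
        have hxw' : x ≠ w := by simpa using hxw
        rw [hdw] at hw
        rcases List.mem_cons.mp hw with rfl | hwr
        · exact hxw' rfl
        · have hxt : x ∈ t := hsub.mem (by rw [hdw]; exact List.mem_cons_self)
          have h1 : w ≤ x := hwle x hxt
          have h2 : x ≤ w := by
            rw [hdw] at hst
            exact (List.pairwise_cons.mp hst).1 w hwr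
          exact hxw' (le_antisymm h2 h1)
    have htake : ∀ x ∈ t.takeWhile (fun x => x == w), x = w := by
      intro x hx
      have := List.mem_takeWhile_imp hx
      simpa using this
    obtain ⟨ihn, ihmem, ihcnt⟩ := ih hst
    have hsplitcnt : ∀ v : String, t.count v
        = (t.takeWhile (fun x => x == w)).count v + (t.dropWhile (fun x => x == w)).count v := by
      intro v
      conv_lhs => rw [← hsplit]
      rw [List.count_append]
    have hcountw : (w :: t).count w = 1 + (t.takeWhile (fun x => x == w)).length := by
      rw [List.count_cons_self, hsplitcnt w]
      have h1 : (t.takeWhile (fun x => x == w)).count w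
          = (t.takeWhile (fun x => x == w)).length := by
        rw [List.count_eq_length]
        intro b hb
        exact (htake b hb).symm
      have h2 : (t.dropWhile (fun x => x == w)).count w = 0 :=
        List.count_eq_zero.mpr hwnot
      omega
    refine ⟨?_, ?_, ?_⟩
    · rw [runsOf]
      simp only [List.map_cons, List.nodup_cons]
      refine ⟨?_, ihn⟩
      intro hmem
      exact hwnot ((ihmem w).mp hmem)
    · intro v
      rw [runsOf]
      simp only [List.map_cons, List.mem_cons, ihmem v]
      constructor
      · rintro (rfl | hv)
        · exact Or.inl rfl
        · exact Or.inr (hsub.mem hv)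
      · rintro (rfl | hvt)
        · exact Or.inl rfl
        · have hvt' : v ∈ t.takeWhile (fun x => x == w) ++ t.dropWhile (fun x => x == w) := by
            rw [hsplit]
            exact hvt
          rcases List.mem_append.mp hvt' with hv1 | hv2
          · exact Or.inl (htake v hv1)
          · exact Or.inr hv2
    · intro p hp
      rw [runsOf] at hp
      rcases List.mem_cons.mp hp with rfl | hp2
      · simp only
        rw [hcountw]
        push_cast
        ring
      · have hv := ihcnt p hp2
        have hvmem : p.1 ∈ t.dropWhile (fun x => x == w) := (ihmem p.1).mp
          (List.mem_map_of_mem hp2)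
        have hvw : p.1 ≠ w := fun h => hwnot (h ▸ hvmem)
        have hc : (w :: t).count p.1 = (t.dropWhile (fun x => x == w)).count p.1 := by
          rw [List.count_cons_of_ne (fun h => hvw h.symm), hsplitcnt p.1]
          have : (t.takeWhile (fun x => x == w)).count p.1 = 0 := by
            rw [List.count_eq_zero]
            intro hmem
            exact hvw (htake _ hmem)
          omega
        rw [hv, hc]

lemma runsOf_eq_map (l : List String) (hs : l.Pairwise (· ≤ ·)) :
    runsOf l = ((runsOf l).map Prod.fst).map (fun w => (w, (l.count w : Int))) := by
  obtain ⟨-, -, hcnt⟩ := runsOf_spec l hs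
  rw [List.map_map]
  nth_rewrite 1 [← List.map_id (runsOf l)]
  apply List.map_congr_left
  intro p hp
  have := hcnt p hp
  simp only [id, Function.comp]
  exact Prod.ext rfl (by simpa using this)

-- runsOf of the sorted column is a rearrangement of Counter(column).items()
lemma runs_perm_counter_items (col : List String) :
    (runsOf (PySem.List.sorted col (fun w => w))).Perm (PySem.Dict.counter col).items := by
  set l := PySem.List.sorted col (fun w => w) with hl
  have hpw : l.Pairwise (· ≤ ·) := by
    have := PySem.List.sorted_pairwise col (fun w : String => w)
    simpa using this
  have hperm : l.Perm col := PySem.List.sorted_perm _ _ _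
  obtain ⟨hnod, hmem, -⟩ := runsOf_spec l hpw
  have hkeys : ((runsOf l).map Prod.fst).Perm (PySem.Set.ofList col) := by
    refine (List.perm_ext_iff_of_nodup hnod (PySem.Set.nodup_ofList col)).mpr ?_
    intro w
    rw [hmem w, PySem.Set.mem_ofList, hperm.mem_iff]
  have hcounts : ∀ w, l.count w = col.count w := fun w => hperm.count_eq w
  rw [runsOf_eq_map l hpw, PySem.Dict.items_counter]
  have hx : ((runsOf l).map Prod.fst).map (fun w => (w, (l.count w : Int)))
      = ((runsOf l).map Prod.fst).map (fun w => (w, (col.count w : Int))) :=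
    List.map_congr_left fun w _ => by rw [hcounts w]
  rw [hx]
  exact hkeys.map _

-- max is invariant under rearrangement (both lists nonempty or both empty)
lemma maxD_id_perm {l₁ l₂ : List Int} (h : l₁.Perm l₂) :
    PySem.List.maxD l₁ (fun v => v) 0 = PySem.List.maxD l₂ (fun v => v) 0 := by
  by_cases h1 : l₁ = []
  · have h2 : l₂ = [] := by
      have := h.length_eq
      rw [h1] at this
      simpa [List.length_eq_zero_iff] using this.symm
    rw [h1, h2]
  · have h2 : l₂ ≠ [] := by
      intro he
      apply h1
      have := h.length_eq
      rw [he] at this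
      simpa [List.length_eq_zero_iff] using this
    apply le_antisymm
    · exact PySem.List.le_maxD_id l₂ 0 _ (h.mem_iff.mp (PySem.List.maxD_mem l₁ _ 0 h1))
    · exact PySem.List.le_maxD_id l₁ 0 _ (h.mem_iff.mpr (PySem.List.maxD_mem l₂ _ 0 h2))

lemma step_rel (submissions : List (List String)) (hne : submissions ≠ []) (j : Nat)
    {t₁ t₂ : PySem.Dict String Int} (h : rel t₁ t₂) :
    rel (astep submissions t₁ j) (bstep submissions t₂ j) := by
  have hcolne : colAt submissions j ≠ [] := by
    simp [colAt, hne]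
  obtain ⟨x, hxmem⟩ := List.exists_mem_of_ne_nil _ hcolne
  have hitems_ne : (PySem.Dict.counter (colAt submissions j)).items ≠ [] := by
    intro h0
    have hxkeys : x ∈ (PySem.Dict.counter (colAt submissions j)).keys := by
      rw [PySem.Dict.keys_counter]
      exact (PySem.Set.mem_ofList _ _).mpr hxmem
    rw [PySem.Dict.keys, h0] at hxkeys
    simp at hxkeys
  have harrne : PySem.List.sorted (PySem.Dict.counter (colAt submissions j)).items
      (fun x => -x.2) ≠ [] := by
    rw [Ne, PySem.List.sorted_eq_nil_iff]
    exact hitems_ne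
  obtain ⟨hd, tl, harr⟩ := List.exists_cons_of_ne_nil harrne
  have hhd_mem : hd ∈ (PySem.Dict.counter (colAt submissions j)).items :=
    (PySem.List.sorted_perm _ _ _).subset (by rw [harr]; exact List.mem_cons_self)
  have h1 : hd.2 ≤ PySem.List.maxD (PySem.Dict.counter (colAt submissions j)).values
      (fun v => v) 0 := by
    simp only [PySem.Dict.values]
    exact PySem.List.le_maxD_id _ 0 hd.2 (List.mem_map_of_mem hhd_mem)
  have h2 : PySem.List.maxD (PySem.Dict.counter (colAt submissions j)).values
      (fun v => v) 0 ≤ hd.2 := by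
    simp only [PySem.Dict.values]
    have hvals_ne : (PySem.Dict.counter (colAt submissions j)).items.map (fun p => p.2) ≠ [] := by
      simp [hitems_ne]
    have hm_mem := PySem.List.maxD_mem _ (fun v : Int => v) 0 hvals_ne
    obtain ⟨p, hp_mem, hp2⟩ := List.mem_map.mp hm_mem
    have hp_arr : p ∈ hd :: tl := by
      rw [← harr]
      exact (PySem.List.sorted_perm _ _ _).symm.subset hp_mem
    rcases List.mem_cons.mp hp_arr with rfl | hp_tl
    · omega
    · have hpw := PySem.List.sorted_pairwise (PySem.Dict.counter (colAt submissions j)).items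
        (fun x : String × Int => -x.2)
      rw [harr] at hpw
      have := (List.pairwise_cons.mp hpw).1 p hp_tl
      omega
  have hm : hd.2 = PySem.List.maxD (PySem.Dict.counter (colAt submissions j)).values
      (fun v => v) 0 := le_antisymm h1 h2
  have hRperm := runs_perm_counter_items (colAt submissions j)
  have hmb : PySem.List.maxD
      ((runsOf (PySem.List.sorted (colAt submissions j) (fun w => w))).map (fun p => p.2))
      (fun v => v) 0
      = PySem.List.maxD (PySem.Dict.counter (colAt submissions j)).values (fun v => v) 0 := by
    have hp2 := hRperm.map (fun p : String × Int => p.2)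
    have := maxD_id_perm hp2
    simpa [PySem.Dict.values] using this
  unfold astep bstep
  rw [harr, aloop_run hd tl t₁, hmb, ← hm]
  have hskip : condAdd hd.2 t₁ tl = condAdd hd.2 t₁ (hd :: tl) := by
    simp [condAdd]
  rw [hskip]
  have hperm : (hd :: tl).Perm
      (runsOf (PySem.List.sorted (colAt submissions j) (fun w => w))) := by
    rw [← harr]
    exact (PySem.List.sorted_perm _ _ _).trans hRperm.symm
  exact condAdd_rel hd.2 hperm h

lemma fold_rel (submissions : List (List String)) (hne : submissions ≠ []) (l : List Nat)
    {t₁ t₂ : PySem.Dict String Int} (h : rel t₁ t₂) :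
    rel (l.foldl (astep submissions) t₁) (l.foldl (bstep submissions) t₂) := by
  induction l generalizing t₁ t₂ with
  | nil => exact h
  | cons j l ih => exact ih (step_rel submissions hne j h)

lemma sorted2_eq_sorted_lex (xs : List (String × Int)) :
    PySem.List.sorted2 xs (fun x => -x.2) (fun x => x.1)
      = PySem.List.sorted xs (fun x => toLex ((-x.2 : Int), x.1)) := by
  have hfun : (fun (a b : String × Int) =>
        decide ((-a.2 : Int) < -b.2) || (!decide ((-b.2 : Int) < -a.2) && decide (a.1 < b.1)))
      = fun a b => decide (toLex ((-a.2 : Int), a.1) < toLex ((-b.2 : Int), b.1)) := by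
    funext a b
    by_cases h1 : (-a.2 : Int) < -b.2 <;> by_cases h2 : (-b.2 : Int) < -a.2 <;>
      by_cases h3 : a.1 < b.1 <;>
      simp [Prod.Lex.lt_iff, h1, h2, h3] <;> omega
  rw [PySem.List.sorted_eq_foldl_insertBy]
  simp only [PySem.List.sorted2, Bool.false_eq_true, if_false, hfun]

lemma sorted2_eq_of_rel {t₁ t₂ : PySem.Dict String Int} (h : rel t₁ t₂) :
    PySem.List.sorted2 t₁.items (fun x => -x.2) (fun x => x.1)
      = PySem.List.sorted2 t₂.items (fun x => -x.2) (fun x => x.1) := by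
  obtain ⟨hn₁, hn₂, hmem, hval⟩ := h
  have hkeys : t₁.keys.Perm t₂.keys := (List.perm_ext_iff_of_nodup hn₁ hn₂).mpr hmem
  have hitems : t₁.items.Perm t₂.items := by
    rw [PySem.Dict.items_eq_map_keys t₁ hn₁ 0, PySem.Dict.items_eq_map_keys t₂ hn₂ 0]
    refine (hkeys.map (fun k => (k, t₁.getD k 0))).trans ?_
    exact List.Perm.of_eq (List.map_congr_left fun k _ => by rw [hval k])
  rw [sorted2_eq_sorted_lex, sorted2_eq_sorted_lex]
  refine PySem.List.eq_of_perm_of_pairwise_le_of_injective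
    (fun x : String × Int => toLex ((-x.2 : Int), x.1)) ?_
    ((PySem.List.sorted_perm _ _ _).trans (hitems.trans (PySem.List.sorted_perm _ _ _).symm))
    (PySem.List.sorted_pairwise _ _) (PySem.List.sorted_pairwise _ _)
  intro p q hpq
  have hpq' : ((-p.2 : Int), p.1) = ((-q.2 : Int), q.1) := congrArg (fun x => ofLex x) hpq
  have h2 : (-p.2 : Int) = -q.2 := congrArg Prod.fst hpq'
  have h1 : p.1 = q.1 := congrArg Prod.snd hpq'
  obtain ⟨pa, pb⟩ := p
  obtain ⟨qa, qb⟩ := q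
  simp only at h1 h2
  simp [h1]
  omega

lemma rel_empty : rel PySem.Dict.empty PySem.Dict.empty := by
  refine ⟨by simp [pysem], by simp [pysem], fun w => Iff.rfl, fun w => rfl⟩

lemma a_eq_fold (submissions : List (List String)) (hpre : Pre_find_mistakes submissions) :
    find_mistakes submissions
      = (PySem.List.sorted2
          ((List.range (submissions.headD []).length).foldl (astep submissions) PySem.Dict.empty).items
          (fun x => -x.2) (fun x => x.1)).map (fun p => p.1) := by
  obtain ⟨s, rest, rfl⟩ := List.exists_cons_of_ne_nil hpre.1
  unfold find_mistakes
  have houter : PySem.List.len (PySem.List.pyGetD (s :: rest) 0 []) = (s.length : Int) := by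
    rw [PySem.List.pyGetD_zero]
    rfl
  rw [houter, PySem.List.pyRange_zero_nat s.length, List.foldl_map,
    PySem.List.foldl_append_singleton_eq_map (fun p : String × Int => p.1), List.nil_append]
  simp only [List.headD_cons]
  suffices hfold : ((List.range s.length).foldl
      (fun tempRes (k : Nat) =>
        ((PySem.List.sorted
          ((PySem.List.pyRange 0 (PySem.List.len (s :: rest))).foldl
            (fun dic i =>
              dic.insert (PySem.List.pyGetD (PySem.List.pyGetD (s :: rest) i []) (k : Int) "")
                (dic.getD (PySem.List.pyGetD (PySem.List.pyGetD (s :: rest) i []) (k : Int) "") 0 + 1))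
            PySem.Dict.empty).items (fun x => -x.2)).foldl
          (fun (st : Int × Int × PySem.Dict String Int) tup =>
            if st.1 == 0 then (st.1 + 1, tup.2, st.2.2)
            else if tup.2 < st.2.1 then
              (st.1 + 1, st.2.1, st.2.2.insert tup.1 (st.2.2.getD tup.1 0 + tup.2))
            else (st.1 + 1, st.2.1, st.2.2))
          (0, -1, tempRes)).2.2)
      PySem.Dict.empty)
      = (List.range s.length).foldl (astep (s :: rest)) PySem.Dict.empty by
    rw [hfold]
  apply PySem.List.foldl_congr_mem
  intro acc k _
  have hdic : (PySem.List.pyRange 0 (PySem.List.len (s :: rest))).foldl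
      (fun dic i =>
        dic.insert (PySem.List.pyGetD (PySem.List.pyGetD (s :: rest) i []) (k : Int) "")
          (dic.getD (PySem.List.pyGetD (PySem.List.pyGetD (s :: rest) i []) (k : Int) "") 0 + 1))
      PySem.Dict.empty
      = PySem.Dict.counter (colAt (s :: rest) k) := by
    have hrw := PySem.List.foldl_pyRange_pyGetD (s :: rest) []
      (fun (dic : PySem.Dict String Int) row =>
        dic.insert (PySem.List.pyGetD row (k : Int) "")
          (dic.getD (PySem.List.pyGetD row (k : Int) "") 0 + 1))
      (PySem.Dict.empty) (a := 0) (le_refl 0)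
    refine hrw.trans ?_
    simp only [Int.toNat_zero, List.drop_zero, PySem.List.pyGetD_natCast]
    rw [← List.foldl_map (f := fun r : List String => r.getD k "")
      (g := fun (d : PySem.Dict String Int) (x : String) => d.insert x (d.getD x 0 + 1))]
    exact PySem.Dict.foldl_insert_getD_add_one_eq_counter _
  rw [hdic]
  rfl

lemma b_eq_fold (submissions : List (List String)) (hpre : Pre_find_mistakes submissions) :
    find_mistakes_alt submissions
      = (PySem.List.sorted2
          ((List.range (submissions.headD []).length).foldl (bstep submissions) PySem.Dict.empty).items
          (fun x => -x.2) (fun x => x.1)).map (fun p => p.1) := by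
  obtain ⟨s, rest, rfl⟩ := List.exists_cons_of_ne_nil hpre.1
  unfold find_mistakes_alt
  have houter : PySem.List.len (PySem.List.pyGetD (s :: rest) 0 []) = (s.length : Int) := by
    rw [PySem.List.pyGetD_zero]
    rfl
  rw [houter, PySem.List.pyRange_zero_nat s.length, List.foldl_map]
  simp only [List.headD_cons]
  suffices hfold : ((List.range s.length).foldl
      (fun totals (k : Nat) =>
        (runsOf (PySem.List.sorted ((s :: rest).map (fun row => PySem.List.pyGetD row (k : Int) ""))
          (fun w => w))).foldl
          (fun t p =>
            if p.2 < PySem.List.maxD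
                ((runsOf (PySem.List.sorted ((s :: rest).map (fun row => PySem.List.pyGetD row (k : Int) ""))
                  (fun w => w))).map (fun p => p.2)) (fun v => v) 0 then
              t.insert p.1 (t.getD p.1 0 + p.2)
            else t) totals)
      PySem.Dict.empty)
      = (List.range s.length).foldl (bstep (s :: rest)) PySem.Dict.empty by
    rw [hfold]
  apply PySem.List.foldl_congr_mem
  intro acc k _
  have hcol : (s :: rest).map (fun row => PySem.List.pyGetD row (k : Int) "")
      = colAt (s :: rest) k := by
    simp [colAt, PySem.List.pyGetD_natCast]
  rw [hcol]
  rfl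

-- ===== VERDICT (by name: the statement is the Claim_ definition above) =====
theorem find_mistakes_spec : Claim_equal_find_mistakes := by
  intro submissions _ hpre
  unfold Spec_find_mistakes
  rw [a_eq_fold submissions hpre, b_eq_fold submissions hpre,
    sorted2_eq_of_rel (fold_rel submissions hpre.1 _ rel_empty)]
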